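-- pv_equiv track=rewrite | github.com/Peebinens/CS3308_BPP | task2/dfs.py | generate_swapped_combinations
-- ===== SOURCE A (Python) =====
-- from itertools import product
--
-- def generate_swapped_combinations(data):
--     # 替换每个子列表的第三个值，与第一个和第二个值交换或保持原值
--     swap_options = []
--
--     _data = data[::-1]
--
--     for sublist in _data:
--         first, second, third = sublist
--         swap_options.append([
--             [third, second, first],  # 与第一个值交换
--             [first, third, second],  # 与第二个值交换
--             [first, second, third],  # 保持不变
--         ])
--     # 使用笛卡尔积生成所有组合
--     result = list(product(*swap_options))
--     return [list(combination) for combination in result]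
-- ===== SOURCE B (Python) =====
-- def generate_swapped_combinations(data):
--     def rec(lists):
--         if not lists:
--             return [[]]
--         first, second, third = lists[0]
--         options = [
--             [third, second, first],
--             [first, third, second],
--             [first, second, third],
--         ]
--         tails = rec(lists[1:])
--         return [[opt] + tail for opt in options for tail in tails]
--     return rec(data[::-1])
-- ===== Notes on version B (the rewrite author's own statement) =====
-- stated objective: alternative
-- what changed: Replaces the two-phase build-options-then-itertools.product pipeline with a single direct recursion over the reversed list that constructs each combination by prepending the current sublist's three swap options to the recursively built tails.
import Mathlib
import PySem

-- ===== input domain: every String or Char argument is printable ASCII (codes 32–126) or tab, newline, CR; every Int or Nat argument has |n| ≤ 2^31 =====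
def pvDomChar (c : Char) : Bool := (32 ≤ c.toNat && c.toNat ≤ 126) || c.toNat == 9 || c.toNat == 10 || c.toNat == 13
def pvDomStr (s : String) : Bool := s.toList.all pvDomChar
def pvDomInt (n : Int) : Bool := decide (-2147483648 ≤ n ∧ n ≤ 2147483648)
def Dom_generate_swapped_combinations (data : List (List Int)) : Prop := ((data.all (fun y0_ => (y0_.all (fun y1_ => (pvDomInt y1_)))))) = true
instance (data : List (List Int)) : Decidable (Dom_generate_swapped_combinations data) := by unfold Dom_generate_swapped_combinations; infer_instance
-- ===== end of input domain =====

-- B replaces the build-options-list + itertools.product pipeline by one direct recursion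
-- over the reversed input (alternative decomposition; same cost).

-- ===== PORT A =====
-- the three swap-option rows of a sublist (ValueError on a sublist of length ≠ 3 is excluded by Pre_; junk value there)
def gscOpts (sublist : List Int) : List (List Int) :=
  match sublist with
  | [first, second, third] => [[third, second, first], [first, third, second], [first, second, third]]
  | _ => []

-- itertools.product over a list of option-lists (rightmost varies fastest)
def gscProduct (pools : List (List (List Int))) : List (List (List Int)) :=
  pools.foldr (fun pool acc => pool.flatMap (fun x => acc.map (fun c => x :: c))) [[]]

def generate_swapped_combinations (data : List (List Int)) : List (List (List Int)) :=
  let _data := data.reverse   -- data[::-1], by PySem.List.slice?_none_none_neg_one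
  let swap_options := _data.foldl (fun acc sublist => acc ++ [gscOpts sublist]) []
  let result := gscProduct swap_options
  result

-- ===== PORT B =====
def gscRec : List (List Int) → List (List (List Int))
  | [] => [[]]
  | x :: rest =>
    let options :=
      match x with
      | [first, second, third] => [[third, second, first], [first, third, second], [first, second, third]]
      | _ => []
    let tails := gscRec rest
    options.flatMap (fun opt => tails.map (fun tail => opt :: tail))

def generate_swapped_combinations_alt (data : List (List Int)) : List (List (List Int)) :=
  gscRec data.reverse

-- ===== PRECONDITION & SPEC =====
-- Pre_ excludes inputs with a sublist of length ≠ 3, on which both Pythons raise ValueError (unpacking)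
def Pre_generate_swapped_combinations (data : List (List Int)) : Prop :=
  ∀ l ∈ data, l.length = 3
instance (data : List (List Int)) : Decidable (Pre_generate_swapped_combinations data) := by
  unfold Pre_generate_swapped_combinations; infer_instance

def pvWitness_generate_swapped_combinations : List (List Int) := [[1, 2, 3], [4, 5, 6]]

def Spec_generate_swapped_combinations (data : List (List Int)) (out : List (List (List Int))) : Prop := out = generate_swapped_combinations_alt data
instance (data : List (List Int)) (out : List (List (List Int))) : Decidable (Spec_generate_swapped_combinations data out) := by unfold Spec_generate_swapped_combinations; infer_instance

-- ===== CLAIM (what is proved, stated in full; the proofs are below) =====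
def Claim_equal_generate_swapped_combinations : Prop := ∀ (data : List (List Int)), Dom_generate_swapped_combinations data → Pre_generate_swapped_combinations data → Spec_generate_swapped_combinations data (generate_swapped_combinations data)

-- ===== LEMMAS AND PROOFS =====
theorem gsc_foldl_append (L : List (List Int)) (init : List (List (List Int))) :
    L.foldl (fun acc sublist => acc ++ [gscOpts sublist]) init = init ++ L.map gscOpts := by
  induction L generalizing init with
  | nil => simp
  | cons x L ih => simp [List.foldl, ih]

theorem gsc_product_map (L : List (List Int)) :
    gscProduct (L.map gscOpts) = gscRec L := by
  induction L with
  | nil => rfl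
  | cons x L ih =>
    simp only [List.map, gscProduct, List.foldr] at *
    rw [ih]
    cases x with
    | nil => rfl
    | cons a t =>
      cases t with
      | nil => rfl
      | cons b t2 =>
        cases t2 with
        | nil => rfl
        | cons c t3 => cases t3 <;> rfl

-- ===== VERDICT (by name: the statement is the Claim_ definition above) =====
theorem generate_swapped_combinations_spec : Claim_equal_generate_swapped_combinations := by
  intro data _ _
  show generate_swapped_combinations data = generate_swapped_combinations_alt data
  unfold generate_swapped_combinations generate_swapped_combinations_alt
  simp only [gsc_foldl_append, List.nil_append]
  exact gsc_product_map data.reverse
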